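-- pv_equiv track=rewrite | github.com/rafaaga/Judges | Python/UVA-13054.py | procedure
-- ===== SOURCE A (Python) =====
-- def procedure(hippos, n, h, Ta, Td):
--     hippos.sort()
--     time, p_init, p_end = 0, 0, (n-1)
--     while p_init <= p_end:
--         if(hippos[p_init] + hippos[p_end]) < h and Td <= (2*Ta) and p_init!=p_end:
--             time += Td
--             p_init += 1
--             p_end -= 1
--         else:
--             p_end -= 1
--             time += Ta
--     return time
-- ===== SOURCE B (Python) =====
-- def procedure(hippos, n, h, Ta, Td):
--     hippos.sort()
--     if n <= 0:
--         return 0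
--     if Td > 2 * Ta:
--         # pairing never pays: everyone crosses alone
--         return n * Ta
--     # k = largest m such that the 2m lightest people can be paired t <-> 2m-1-t
--     # with every pair lighter than h; on a sorted list this predicate is monotone
--     # in m and its maximum equals the optimal number of shared crossings, so we
--     # find it by binary search instead of any pointer scan.
--     def fits(m):
--         return all(hippos[t] + hippos[2 * m - 1 - t] < h for t in range(m))
--     lo, hi = 0, n // 2
--     while lo < hi:
--         mid = (lo + hi + 1) // 2
--         if fits(mid):
--             lo = mid
--         else:
--             hi = mid - 1
--     return lo * Td + (n - 2 * lo) * Ta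
-- ===== Notes on version B (the rewrite author's own statement) =====
-- stated objective: alternative
-- what changed: B drops A's two-pointer simulation entirely: after sorting (and hoisting the invariant tests n<=0 and Td>2*Ta) it binary-searches the largest m such that the 2m lightest people can be paired t with 2m-1-t all under the weight limit (a monotone predicate on the sorted list, proved equal to A's greedy pair count), and returns the closed form m*Td+(n-2m)*Ta.
import Mathlib
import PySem

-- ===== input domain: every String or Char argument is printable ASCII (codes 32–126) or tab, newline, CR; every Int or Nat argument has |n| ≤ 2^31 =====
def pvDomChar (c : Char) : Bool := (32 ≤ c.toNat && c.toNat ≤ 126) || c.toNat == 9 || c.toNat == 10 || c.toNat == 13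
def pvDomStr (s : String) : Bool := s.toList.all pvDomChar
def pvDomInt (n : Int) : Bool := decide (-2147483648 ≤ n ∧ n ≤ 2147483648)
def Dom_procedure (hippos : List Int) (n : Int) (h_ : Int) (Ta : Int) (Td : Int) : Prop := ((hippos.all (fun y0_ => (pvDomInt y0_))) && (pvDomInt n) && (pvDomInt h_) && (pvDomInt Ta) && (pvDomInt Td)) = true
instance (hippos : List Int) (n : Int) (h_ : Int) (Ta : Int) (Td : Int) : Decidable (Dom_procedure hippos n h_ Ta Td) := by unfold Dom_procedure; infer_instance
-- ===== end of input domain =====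

-- B replaces A's two-pointer greedy simulation by a binary search for the largest m such
-- that the 2m lightest people can be paired t<->(2m-1-t) under the limit, plus a closed form
-- (objective: alternative algorithm). Both A and B sort the list argument in place (same
-- side effect); the equivalence proved here is about the return value.

-- ===== PORT A =====
-- the while loop of A: state (time, p_init, p_end); list accesses are in range under Pre_
def procLoopA (xs : List Int) (h_ Ta Td : Int) (time pInit pEnd : Int) : Int :=
  if hle : pInit ≤ pEnd then
    if (PySem.List.pyGet? xs pInit).getD 0 + (PySem.List.pyGet? xs pEnd).getD 0 < h_ ∧
        Td ≤ 2 * Ta ∧ pInit ≠ pEnd then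
      procLoopA xs h_ Ta Td (time + Td) (pInit + 1) (pEnd - 1)
    else
      procLoopA xs h_ Ta Td (time + Ta) pInit (pEnd - 1)
  else time
termination_by (pEnd + 1 - pInit).toNat
decreasing_by all_goals omega

def procedure (hippos : List Int) (n : Int) (h_ : Int) (Ta : Int) (Td : Int) : Int :=
  procLoopA (PySem.List.sorted hippos (fun x => x) false) h_ Ta Td 0 0 (n - 1)

-- ===== PORT B =====
-- fits(m): all(hippos[t] + hippos[2*m-1-t] < h for t in range(m))
def fitsB (xs : List Int) (h_ : Int) (m : Int) : Bool :=
  (PySem.List.pyRange 0 m 1).all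
    (fun t => decide ((PySem.List.pyGet? xs t).getD 0 + (PySem.List.pyGet? xs (2 * m - 1 - t)).getD 0 < h_))

-- mid = (lo + hi + 1) // 2
def pvMid (lo hi : Int) : Int := PySem.Int.floordiv (lo + hi + 1) 2

theorem pvMid_bounds (lo hi : Int) (hlh : lo < hi) : lo < pvMid lo hi ∧ pvMid lo hi ≤ hi := by
  unfold pvMid
  rw [PySem.Int.floordiv_eq_ediv_of_pos (by norm_num)]
  omega

-- the binary-search while loop of B: state (lo, hi)
def bsearchB (xs : List Int) (h_ : Int) (lo hi : Int) : Int :=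
  if hlh : lo < hi then
    if fitsB xs h_ (pvMid lo hi) then bsearchB xs h_ (pvMid lo hi) hi
    else bsearchB xs h_ lo (pvMid lo hi - 1)
  else lo
termination_by (hi - lo).toNat
decreasing_by
  · have := pvMid_bounds lo hi hlh; omega
  · have := pvMid_bounds lo hi hlh; omega

def procedure_alt (hippos : List Int) (n : Int) (h_ : Int) (Ta : Int) (Td : Int) : Int :=
  let xs := PySem.List.sorted hippos (fun x => x) false
  if n ≤ 0 then 0
  else if 2 * Ta < Td then n * Ta
  else
    let k := bsearchB xs h_ 0 (PySem.Int.floordiv n 2)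
    k * Td + (n - 2 * k) * Ta

-- ===== PRECONDITION & SPEC =====
-- A indexes hippos[n-1]; exactly when n > len(hippos) (so 1 ≤ n > len) that raises IndexError.
def Pre_procedure (hippos : List Int) (n : Int) (h_ : Int) (Ta : Int) (Td : Int) : Prop :=
  n ≤ (hippos.length : Int)
instance (hippos : List Int) (n : Int) (h_ : Int) (Ta : Int) (Td : Int) : Decidable (Pre_procedure hippos n h_ Ta Td) := by unfold Pre_procedure; infer_instance

def pvWitness_procedure : List Int × Int × Int × Int × Int := ([2, 1, 3], 3, 4, 1, 2)

def Spec_procedure (hippos : List Int) (n : Int) (h_ : Int) (Ta : Int) (Td : Int) (out : Int) : Prop := out = procedure_alt hippos n h_ Ta Td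
instance (hippos : List Int) (n : Int) (h_ : Int) (Ta : Int) (Td : Int) (out : Int) : Decidable (Spec_procedure hippos n h_ Ta Td out) := by unfold Spec_procedure; infer_instance

-- ===== CLAIM (what is proved, stated in full; the proofs are below) =====
def Claim_equal_procedure : Prop := ∀ (hippos : List Int) (n : Int) (h_ : Int) (Ta : Int) (Td : Int), Dom_procedure hippos n h_ Ta Td → Pre_procedure hippos n h_ Ta Td → Spec_procedure hippos n h_ Ta Td (procedure hippos n h_ Ta Td)

-- ===== LEMMAS AND PROOFS =====

-- proof-side two-pointer pair counter (the count A's loop implicitly accumulates)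
def procLoopB (xs : List Int) (h_ : Int) (k i j : Int) : Int :=
  if hij : i < j then
    if (PySem.List.pyGet? xs i).getD 0 + (PySem.List.pyGet? xs j).getD 0 < h_ then
      procLoopB xs h_ (k + 1) (i + 1) (j - 1)
    else
      procLoopB xs h_ k i (j - 1)
  else k
termination_by (j - i).toNat
decreasing_by all_goals omega

theorem procLoopB_shift (xs : List Int) (h_ k i j c : Int) :
    procLoopB xs h_ (k + c) i j = procLoopB xs h_ k i j + c := by
  fun_induction procLoopB xs h_ k i j generalizing c with
  | case1 k i j hij hlt ih =>
    rw [procLoopB]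
    simp only [hij, dite_true, hlt, if_true]
    have : k + c + 1 = (k + 1) + c := by ring
    rw [this, ih]
  | case2 k i j hij hlt ih =>
    rw [procLoopB]
    simp only [hij, dite_true, hlt, if_false]
    exact ih c
  | case3 k i j hij =>
    rw [procLoopB]
    simp [hij]

-- A's loop, when Td > 2*Ta: every iteration takes the else branch
theorem loopA_solo (xs : List Int) (h_ Ta Td : Int) (hTd : 2 * Ta < Td) :
    ∀ (m : Nat) (time i j : Int), (j + 1 - i).toNat = m → 0 ≤ j + 1 - i →
      procLoopA xs h_ Ta Td time i j = time + (j + 1 - i) * Ta := by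
  intro m
  induction m with
  | zero =>
    intro time i j hm hge
    rw [procLoopA]
    have hji : ¬ i ≤ j := by omega
    simp only [hji, dite_false]
    have : j + 1 - i = 0 := by omega
    rw [this]; ring
  | succ m ih =>
    intro time i j hm hge
    rw [procLoopA]
    have hij : i ≤ j := by omega
    simp only [hij, dite_true]
    have hc : ¬ ((PySem.List.pyGet? xs i).getD 0 + (PySem.List.pyGet? xs j).getD 0 < h_ ∧
        Td ≤ 2 * Ta ∧ i ≠ j) := by
      rintro ⟨-, h2, -⟩; omega
    rw [if_neg hc, ih (time + Ta) i (j - 1) (by omega) (by omega)]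
    ring

-- A's loop, when Td ≤ 2*Ta: time + pair count × Td + solos × Ta
theorem loopA_pairs (xs : List Int) (h_ Ta Td : Int) (hTd : Td ≤ 2 * Ta) :
    ∀ (m : Nat) (time i j : Int), (j + 1 - i).toNat = m → 0 ≤ j + 1 - i →
      procLoopA xs h_ Ta Td time i j =
        time + procLoopB xs h_ 0 i j * Td +
          ((j + 1 - i) - 2 * procLoopB xs h_ 0 i j) * Ta := by
  intro m
  induction m using Nat.strong_induction_on with
  | _ m IH =>
    intro time i j hm hge
    by_cases hij : i ≤ j
    · rw [procLoopA]
      simp only [hij, dite_true]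
      by_cases hpair : (PySem.List.pyGet? xs i).getD 0 + (PySem.List.pyGet? xs j).getD 0 < h_ ∧ i ≠ j
      · rw [if_pos ⟨hpair.1, hTd, hpair.2⟩]
        have hlt : i < j := by omega
        have hB : procLoopB xs h_ 0 i j = procLoopB xs h_ 0 (i + 1) (j - 1) + 1 := by
          rw [procLoopB]
          simp only [hlt, dite_true, hpair.1, if_true]
          rw [show (0 : Int) + 1 = 0 + 1 from rfl, procLoopB_shift]
        rw [hB, IH ((j - 1) + 1 - (i + 1)).toNat (by omega) (time + Td) (i + 1) (j - 1)
          rfl (by omega)]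
        ring
      · rw [if_neg (by rintro ⟨h1, -, h3⟩; exact hpair ⟨h1, h3⟩)]
        by_cases heq : i = j
        · subst heq
          have hB : procLoopB xs h_ 0 i i = 0 := by
            rw [procLoopB]; simp
          rw [hB, IH ((i - 1) + 1 - i).toNat (by omega) (time + Ta) i (i - 1) rfl (by omega)]
          have hB' : procLoopB xs h_ 0 i (i - 1) = 0 := by
            rw [procLoopB]
            have : ¬ i < i - 1 := by omega
            simp [this]
          rw [hB']; ring
        · have hlt : i < j := by omega
          have hsum : ¬ (PySem.List.pyGet? xs i).getD 0 + (PySem.List.pyGet? xs j).getD 0 < h_ := by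
            intro h1; exact hpair ⟨h1, heq⟩
          have hB : procLoopB xs h_ 0 i j = procLoopB xs h_ 0 i (j - 1) := by
            rw [procLoopB]; simp only [hlt, dite_true, hsum, if_false]
          rw [hB, IH ((j - 1) + 1 - i).toNat (by omega) (time + Ta) i (j - 1) rfl (by omega)]
          ring
    · rw [procLoopA]
      simp only [hij, dite_false]
      have hB : procLoopB xs h_ 0 i j = 0 := by
        rw [procLoopB]
        have : ¬ i < j := by omega
        simp [this]
      rw [hB]
      have : j + 1 - i = 0 := by omega
      rw [this]; ring

-- monotone access on a sorted list
theorem sorted_get_mono (ys : List Int) (p q : Int) (hp : 0 ≤ p) (hpq : p ≤ q)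
    (hq : q < ((PySem.List.sorted ys (fun x => x) false).length : Int)) :
    (PySem.List.pyGet? (PySem.List.sorted ys (fun x => x) false) p).getD 0 ≤
      (PySem.List.pyGet? (PySem.List.sorted ys (fun x => x) false) q).getD 0 := by
  have e1 := PySem.List.pyGet?_eq_some_getElem (PySem.List.sorted ys (fun x => x) false)
    (i := p) hp (by omega)
  have e2 := PySem.List.pyGet?_eq_some_getElem (PySem.List.sorted ys (fun x => x) false)
    (i := q) (by omega) (by omega)
  rw [e1, e2]
  simp only [Option.getD_some]
  exact PySem.List.sorted_id_getElem_mono ys (p := p.toNat) (q := q.toNat) (by omega) (by omega)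

-- the two-pointer count k is exactly characterised by the prefix self-pairing predicate:
-- the k pairs t<->(i+2k-1-t) all fit, and no m > k admits such a pairing
theorem tp_char (xs : List Int) (h_ : Int)
    (hmono : ∀ p q : Int, 0 ≤ p → p ≤ q → q < (xs.length : Int) →
      (PySem.List.pyGet? xs p).getD 0 ≤ (PySem.List.pyGet? xs q).getD 0) :
    ∀ (m : Nat) (i j : Int), (j + 1 - i).toNat = m → 0 ≤ i → i ≤ j + 1 → j < (xs.length : Int) →
      0 ≤ procLoopB xs h_ 0 i j ∧
      2 * procLoopB xs h_ 0 i j ≤ j + 1 - i ∧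
      (∀ t, 0 ≤ t → t < procLoopB xs h_ 0 i j →
        (PySem.List.pyGet? xs (i + t)).getD 0 +
          (PySem.List.pyGet? xs (i + 2 * procLoopB xs h_ 0 i j - 1 - t)).getD 0 < h_) ∧
      (∀ m', procLoopB xs h_ 0 i j < m' → 2 * m' ≤ j + 1 - i →
        ∃ t, 0 ≤ t ∧ t < m' ∧
          ¬ ((PySem.List.pyGet? xs (i + t)).getD 0 +
              (PySem.List.pyGet? xs (i + 2 * m' - 1 - t)).getD 0 < h_)) := by
  intro m
  induction m using Nat.strong_induction_on with
  | _ m IH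
  intro i j hm hi hij1 hjlen
  by_cases hij : i < j
  · by_cases hfit : (PySem.List.pyGet? xs i).getD 0 + (PySem.List.pyGet? xs j).getD 0 < h_
    · have hk : procLoopB xs h_ 0 i j = procLoopB xs h_ 0 (i + 1) (j - 1) + 1 := by
        rw [procLoopB]
        simp only [hij, dite_true, hfit, if_true]
        rw [show (0 : Int) + 1 = 0 + 1 from rfl, procLoopB_shift]
      obtain ⟨ih0, ih1, ih2, ih3⟩ :=
        IH ((j - 1) + 1 - (i + 1)).toNat (by omega) (i + 1) (j - 1) rfl (by omega) (by omega)
          (by omega)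
      set k' := procLoopB xs h_ 0 (i + 1) (j - 1) with hk'
      rw [hk]
      refine ⟨by omega, by omega, ?_, ?_⟩
      · intro t ht0 htk
        by_cases ht : t = 0
        · subst ht
          have hidx : i + 2 * (k' + 1) - 1 - 0 = i + 2 * k' + 1 := by ring
          rw [hidx]
          have hle : i + 2 * k' + 1 ≤ j := by omega
          have hmn := hmono (i + 2 * k' + 1) j (by omega) hle hjlen
          have hi0 : i + (0 : Int) = i := by ring
          rw [hi0]
          omega
        · have := ih2 (t - 1) (by omega) (by omega)
          have hidx1 : i + 1 + (t - 1) = i + t := by ring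
          have hidx2 : i + 1 + 2 * k' - 1 - (t - 1) = i + 2 * (k' + 1) - 1 - t := by ring
          rw [hidx1, hidx2] at this
          exact this
      · intro m' hm' hcap
        obtain ⟨t', ht0, ht1, ht2⟩ := ih3 (m' - 1) (by omega) (by omega)
        refine ⟨t' + 1, by omega, by omega, ?_⟩
        have hidx1 : i + 1 + t' = i + (t' + 1) := by ring
        have hidx2 : i + 1 + 2 * (m' - 1) - 1 - t' = i + 2 * m' - 1 - (t' + 1) := by ring
        rw [hidx1, hidx2] at ht2
        exact ht2
    · have hk : procLoopB xs h_ 0 i j = procLoopB xs h_ 0 i (j - 1) := by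
        rw [procLoopB]
        simp only [hij, dite_true, hfit, if_false]
      obtain ⟨ih0, ih1, ih2, ih3⟩ :=
        IH ((j - 1) + 1 - i).toNat (by omega) i (j - 1) rfl (by omega) (by omega) (by omega)
      rw [hk]
      refine ⟨ih0, by omega, ih2, ?_⟩
      intro m' hm' hcap
      by_cases hfull : 2 * m' ≤ j - i
      · exact ih3 m' hm' (by omega)
      · refine ⟨0, le_refl 0, by omega, ?_⟩
        have hidx : i + 2 * m' - 1 - 0 = j := by omega
        rw [hidx]
        simpa using hfit
  · have hk : procLoopB xs h_ 0 i j = 0 := by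
      rw [procLoopB]
      simp [hij]
    rw [hk]
    refine ⟨le_refl 0, by omega, by omega, ?_⟩
    intro m' hm' hcap
    exact absurd hcap (by omega)

-- fitsB unfolded to its pointwise meaning
theorem fitsB_iff (xs : List Int) (h_ m : Int) :
    fitsB xs h_ m = true ↔ ∀ t : Int, 0 ≤ t → t < m →
      (PySem.List.pyGet? xs t).getD 0 + (PySem.List.pyGet? xs (2 * m - 1 - t)).getD 0 < h_ := by
  unfold fitsB
  rw [List.all_eq_true]
  constructor
  · intro hall t ht0 htm
    have := hall t (by rw [PySem.List.mem_pyRange_one]; omega)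
    exact of_decide_eq_true this
  · intro hpt t htmem
    rw [PySem.List.mem_pyRange_one] at htmem
    exact decide_eq_true (hpt t htmem.1 htmem.2)

-- binary search finds k when fitsB is true up to k and false above it (within the cap)
theorem bsearch_eq (xs : List Int) (h_ k nb : Int)
    (hfit : ∀ m, 0 ≤ m → m ≤ k → 2 * m ≤ nb → fitsB xs h_ m = true)
    (hnofit : ∀ m, k < m → 2 * m ≤ nb → fitsB xs h_ m = false) :
    ∀ (sz : Nat) (lo hi : Int), (hi - lo).toNat = sz → 0 ≤ lo → lo ≤ k → k ≤ hi →
      2 * hi ≤ nb → bsearchB xs h_ lo hi = k := by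
  intro sz
  induction sz using Nat.strong_induction_on with
  | _ sz IH
  intro lo hi hsz hlo0 hlok hkhi hcap
  by_cases hlh : lo < hi
  · obtain ⟨hm1, hm2⟩ := pvMid_bounds lo hi hlh
    rw [bsearchB]
    simp only [hlh, dite_true]
    by_cases hmk : pvMid lo hi ≤ k
    · rw [if_pos (hfit (pvMid lo hi) (by omega) hmk (by omega))]
      exact IH (hi - pvMid lo hi).toNat (by omega) (pvMid lo hi) hi rfl (by omega) hmk hkhi hcap
    · rw [if_neg (by rw [hnofit (pvMid lo hi) (by omega) (by omega)]; simp)]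
      exact IH (pvMid lo hi - 1 - lo).toNat (by omega) lo (pvMid lo hi - 1) rfl hlo0 hlok
        (by omega) (by omega)
  · rw [bsearchB]
    simp only [hlh, dite_false]
    omega

-- ===== VERDICT (by name: the statement is the Claim_ definition above) =====
theorem procedure_spec : Claim_equal_procedure := by
  intro hippos n h_ Ta Td _ hpre
  unfold Spec_procedure procedure procedure_alt
  by_cases hn : n ≤ 0
  · have h0 : ¬ (0 : Int) ≤ n - 1 := by omega
    rw [procLoopA, dif_neg h0]
    simp [hn]
  · simp only [if_neg hn]
    by_cases hTd : 2 * Ta < Td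
    · rw [loopA_solo _ h_ Ta Td hTd (n - 1 + 1 - 0).toNat 0 0 (n - 1) rfl (by omega),
        if_pos hTd]
      ring_nf
    · rw [if_neg hTd]
      set xs := PySem.List.sorted hippos (fun x => x) false with hxs
      have hlen : (xs.length : Int) = (hippos.length : Int) := by
        rw [hxs, PySem.List.length_sorted]
      have hmono : ∀ p q : Int, 0 ≤ p → p ≤ q → q < (xs.length : Int) →
          (PySem.List.pyGet? xs p).getD 0 ≤ (PySem.List.pyGet? xs q).getD 0 := by
        intro p q hp hpq hq
        exact sorted_get_mono hippos p q hp hpq hq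
      obtain ⟨hk0, hk1, hk2, hk3⟩ := tp_char xs h_ hmono (n - 1 + 1 - 0).toNat 0 (n - 1) rfl
        (le_refl 0) (by omega) (by unfold Pre_procedure at hpre; omega)
      set K := procLoopB xs h_ 0 0 (n - 1) with hK
      rw [loopA_pairs xs h_ Ta Td (by omega) (n - 1 + 1 - 0).toNat 0 0 (n - 1) rfl (by omega)]
      have hhalf : PySem.Int.floordiv n 2 = n / 2 :=
        PySem.Int.floordiv_eq_ediv_of_pos (by norm_num)
      have hb : bsearchB xs h_ 0 (PySem.Int.floordiv n 2) = K := by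
        apply bsearch_eq xs h_ K n ?_ ?_ (PySem.Int.floordiv n 2 - 0).toNat 0
          (PySem.Int.floordiv n 2) rfl (le_refl 0) (by omega) (by rw [hhalf]; omega)
          (by rw [hhalf]; omega)
        · intro m hm0 hmK hmcap
          rw [fitsB_iff]
          intro t ht0 htm
          have hpair := hk2 t ht0 (by omega)
          have hle : 2 * m - 1 - t ≤ 0 + 2 * K - 1 - t := by omega
          have hmono' := hmono (2 * m - 1 - t) (0 + 2 * K - 1 - t) (by omega) hle
            (by unfold Pre_procedure at hpre; omega)
          have ht' : (PySem.List.pyGet? xs (0 + t)).getD 0 = (PySem.List.pyGet? xs t).getD 0 := by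
            norm_num
          rw [ht'] at hpair
          omega
        · intro m hKm hmcap
          obtain ⟨t, ht0, htm, hbad⟩ := hk3 m hKm (by omega)
          rw [← Bool.not_eq_true, fitsB_iff]
          intro hall
          apply hbad
          have := hall t ht0 htm
          have hidx1 : (0 : Int) + t = t := by ring
          have hidx2 : (0 : Int) + 2 * m - 1 - t = 2 * m - 1 - t := by ring
          rw [hidx1, hidx2]
          exact this
      rw [hb]
      ring
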